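-- pv_equiv track=rewrite | github.com/tagomatech/SeasonalForge | ui_components.py | _ordered_anchor_years
-- ===== SOURCE A (Python) =====
-- from typing import Dict, Any, List, Tuple, Optional
--
-- def _ordered_anchor_years(years: List[int], reference_anchor_year: Optional[int]) -> List[int]:
--     """Order years so the reference year appears first, then older years, then future years."""
--     uniq = sorted(set(int(y) for y in years))
--     if reference_anchor_year is None:
--         return sorted(uniq, reverse=True)
--
--     ref = int(reference_anchor_year)
--     present_and_past = sorted((y for y in uniq if y <= ref), reverse=True)
--     future = sorted((y for y in uniq if y > ref))
--     return present_and_past + future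
-- ===== SOURCE B (Python) =====
-- def _ordered_anchor_years(years, reference_anchor_year):
--     """Selection: repeatedly extract the next year in anchor order (max past year,
--     else min future year) from the pool of unique years; no sorting at all."""
--     pool = {int(y) for y in years}
--     ref = None if reference_anchor_year is None else int(reference_anchor_year)
--     out = []
--     while pool:
--         if ref is None:
--             nxt = max(pool)
--         else:
--             past = [y for y in pool if y <= ref]
--             nxt = max(past) if past else min(pool)
--         out.append(nxt)
--         pool.remove(nxt)
--     return out
-- ===== Notes on version B (the rewrite author's own statement) =====
-- stated objective: alternative
-- what changed: B does not sort at all: it repeatedly extracts the next year in anchor order (the max of the remaining past years, else the min of the remaining future years) from the pool of unique years, a selection loop instead of A's concatenation of two filtered library sorts.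
import Mathlib
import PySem

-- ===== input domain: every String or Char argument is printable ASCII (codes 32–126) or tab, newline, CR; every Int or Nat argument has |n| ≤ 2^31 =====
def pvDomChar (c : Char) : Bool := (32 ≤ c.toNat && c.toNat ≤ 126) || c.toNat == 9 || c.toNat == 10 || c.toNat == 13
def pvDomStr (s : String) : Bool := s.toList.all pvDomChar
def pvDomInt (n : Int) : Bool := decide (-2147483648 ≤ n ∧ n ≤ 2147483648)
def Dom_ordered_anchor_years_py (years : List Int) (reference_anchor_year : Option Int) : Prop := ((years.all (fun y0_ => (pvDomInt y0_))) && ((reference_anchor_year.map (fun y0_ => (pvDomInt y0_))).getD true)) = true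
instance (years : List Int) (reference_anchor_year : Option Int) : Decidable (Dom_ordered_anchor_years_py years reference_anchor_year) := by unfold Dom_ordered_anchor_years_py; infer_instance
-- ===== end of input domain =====

-- B replaces A's filtered library sorts by a sort-free selection loop that repeatedly extracts
-- the next year in anchor order from the pool; objective: alternative (no speed claim).

-- ===== PORT A =====
def ordered_anchor_years_py (years : List Int) (reference_anchor_year : Option Int) : List Int :=
  let uniq := PySem.List.sorted (PySem.Set.ofList years) (fun x => x) false
  match reference_anchor_year with
  | none => PySem.List.sorted uniq (fun x => x) true
  | some ref =>
    let present_and_past := PySem.List.sorted (uniq.filter (fun y => decide (y ≤ ref))) (fun x => x) true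
    let future := PySem.List.sorted (uniq.filter (fun y => decide (ref < y))) (fun x => x) false
    present_and_past ++ future

-- ===== PORT B =====
-- 'nxt = max(pool)' / 'nxt = max(past) if past else min(pool)' of Source B (pool nonempty)
def pvPick (ref? : Option Int) (pool : List Int) : Int :=
  match ref? with
  | none => (PySem.List.max? pool (fun y => y)).getD 0
  | some ref =>
    match PySem.List.max? (pool.filter (fun y => decide (y ≤ ref))) (fun y => y) with
    | some m => m
    | none => (PySem.List.min? pool (fun y => y)).getD 0

theorem pvPick_mem (ref? : Option Int) (pool : List Int) (h : pool ≠ []) :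
    pvPick ref? pool ∈ pool := by
  match ref? with
  | none =>
    cases hm : PySem.List.max? pool (fun y => y) with
    | none => exact absurd ((PySem.List.max?_eq_none_iff _ _).mp hm) h
    | some m => simpa [pvPick, hm] using PySem.List.max?_mem hm
  | some ref =>
    cases hm : PySem.List.max? (pool.filter (fun y => decide (y ≤ ref))) (fun y => y) with
    | none =>
      cases hn : PySem.List.min? pool (fun y => y) with
      | none => exact absurd ((PySem.List.min?_eq_none_iff _ _).mp hn) h
      | some m => simpa [pvPick, hm, hn] using PySem.List.min?_mem hn
    | some m =>
      have := PySem.List.max?_mem hm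
      simp only [List.mem_filter] at this
      simpa [pvPick, hm] using this.1

-- the 'while pool: … out.append(nxt); pool.remove(nxt)' loop of Source B
def pvSel (ref? : Option Int) (pool : List Int) : List Int :=
  if h : pool = [] then []
  else pvPick ref? pool :: pvSel ref? (pool.erase (pvPick ref? pool))
termination_by pool.length
decreasing_by
  have h1 := List.length_erase_of_mem (pvPick_mem ref? pool h)
  have h2 : pool.length ≠ 0 := fun hl => h (List.length_eq_zero_iff.mp hl)
  omega

def ordered_anchor_years_py_alt (years : List Int) (reference_anchor_year : Option Int) : List Int :=
  pvSel reference_anchor_year (PySem.Set.ofList years)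

-- ===== PRECONDITION & SPEC =====
def Spec_ordered_anchor_years_py (years : List Int) (reference_anchor_year : Option Int) (out : List Int) : Prop := out = ordered_anchor_years_py_alt years reference_anchor_year
instance (years : List Int) (reference_anchor_year : Option Int) (out : List Int) : Decidable (Spec_ordered_anchor_years_py years reference_anchor_year out) := by unfold Spec_ordered_anchor_years_py; infer_instance

-- ===== CLAIM (what is proved, stated in full; the proofs are below) =====
def Claim_equal_ordered_anchor_years_py : Prop := ∀ (years : List Int) (reference_anchor_year : Option Int), Dom_ordered_anchor_years_py years reference_anchor_year → Spec_ordered_anchor_years_py years reference_anchor_year (ordered_anchor_years_py years reference_anchor_year)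

-- ===== LEMMAS AND PROOFS =====

-- the anchor order: x comes strictly before y in the output
def pvR (ref? : Option Int) (x y : Int) : Prop :=
  match ref? with
  | none => y < x
  | some ref => (x ≤ ref ∧ ref < y) ∨ (x ≤ ref ∧ y ≤ ref ∧ y < x) ∨ (ref < x ∧ ref < y ∧ x < y)

theorem pvR_asymm (r : Option Int) (x y : Int) (h1 : pvR r x y) (h2 : pvR r y x) : False := by
  cases r <;> dsimp [pvR] at h1 h2 <;> omega

-- a permutation pairwise-ordered by an asymmetric relation is unique
theorem pv_eq_of_perm_of_pairwise (r : Option Int) :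
    ∀ (l1 l2 : List Int), l1.Perm l2 → l1.Pairwise (pvR r) → l2.Pairwise (pvR r) → l1 = l2 := by
  intro l1
  induction l1 with
  | nil => intro l2 hp _ _; simpa using hp.symm.eq_nil
  | cons a t1 ih =>
    intro l2 hp h1 h2
    cases l2 with
    | nil => exact absurd hp.eq_nil (by simp)
    | cons b t2 =>
      rcases List.pairwise_cons.mp h1 with ⟨ha, ht1⟩
      rcases List.pairwise_cons.mp h2 with ⟨hb, ht2⟩
      have hab : a = b := by
        by_contra hne
        have haIn : a ∈ b :: t2 := hp.mem_iff.mp (by simp)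
        have hbIn : b ∈ a :: t1 := hp.mem_iff.mpr (by simp)
        have haT : a ∈ t2 := by
          rcases List.mem_cons.mp haIn with h | h
          · exact absurd h hne
          · exact h
        have hbT : b ∈ t1 := by
          rcases List.mem_cons.mp hbIn with h | h
          · exact absurd h.symm hne
          · exact h
        exact pvR_asymm r a b (ha b hbT) (hb a haT)
      subst hab
      have : t1 = t2 := ih t2 hp.cons_inv ht1 ht2
      rw [this]

theorem pvPick_R (ref? : Option Int) (pool : List Int) (h : pool ≠ [])
    (y : Int) (hy : y ∈ pool) (hne : y ≠ pvPick ref? pool) : pvR ref? (pvPick ref? pool) y := by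
  match ref? with
  | none =>
    cases hm : PySem.List.max? pool (fun y => y) with
    | none => exact absurd ((PySem.List.max?_eq_none_iff _ _).mp hm) h
    | some m =>
      have hmax := PySem.List.max?_isMax hm y hy
      simp only [pvPick, hm, Option.getD_some] at hne ⊢
      dsimp [pvR]; omega
  | some ref =>
    cases hm : PySem.List.max? (pool.filter (fun y => decide (y ≤ ref))) (fun y => y) with
    | none =>
      have hfe : pool.filter (fun y => decide (y ≤ ref)) = [] := (PySem.List.max?_eq_none_iff _ _).mp hm
      have hally : ∀ z ∈ pool, ref < z := by
        intro z hz
        by_contra hzle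
        have : z ∈ pool.filter (fun y => decide (y ≤ ref)) := by
          simp only [List.mem_filter, decide_eq_true_eq]; exact ⟨hz, by omega⟩
        rw [hfe] at this; simp at this
      cases hn : PySem.List.min? pool (fun y => y) with
      | none => exact absurd ((PySem.List.min?_eq_none_iff _ _).mp hn) h
      | some m =>
        have hmin := PySem.List.min?_isMin hn y hy
        have hmem := PySem.List.min?_mem hn
        have hym := hally y hy
        have hmm := hally m hmem
        simp only [pvPick, hm, hn, Option.getD_some] at hne ⊢
        dsimp [pvR]; omega
    | some m =>
      have hmem := PySem.List.max?_mem hm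
      simp only [List.mem_filter, decide_eq_true_eq] at hmem
      simp only [pvPick, hm] at hne ⊢
      dsimp [pvR]
      by_cases hyle : y ≤ ref
      · have : y ∈ pool.filter (fun y => decide (y ≤ ref)) := by
          simp only [List.mem_filter, decide_eq_true_eq]; exact ⟨hy, hyle⟩
        have := PySem.List.max?_isMax hm y this
        omega
      · omega

theorem pvSel_spec (r : Option Int) :
    ∀ (pool : List Int), pool.Nodup →
      (pvSel r pool).Perm pool ∧ (pvSel r pool).Pairwise (pvR r) := by
  intro pool
  induction pool using pvSel.induct r with
  | case1 => intro _; simp [pvSel]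
  | case2 pool h ih =>
    intro hnd
    have hmem := pvPick_mem r pool h
    have hnd' : (pool.erase (pvPick r pool)).Nodup := hnd.erase _
    rcases ih hnd' with ⟨hperm, hpw⟩
    rw [pvSel, dif_neg h]
    constructor
    · exact ((hperm.cons (pvPick r pool)).trans (List.perm_cons_erase hmem).symm)
    · refine List.pairwise_cons.mpr ⟨?_, hpw⟩
      intro y hy
      have hyE : y ∈ pool.erase (pvPick r pool) := hperm.mem_iff.mp hy
      have := (hnd.mem_erase_iff).mp hyE
      exact pvPick_R r pool h y this.2 this.1

-- A-side: the output is the unique years pairwise-ordered by pvR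
theorem pv_sorted_rev_eq_reverse (l : List Int) (h : l.Pairwise (· < ·)) :
    PySem.List.sorted l (fun x => x) true = l.reverse :=
  PySem.List.sorted_rev_eq_of_perm_of_pairwise_gt l l.reverse (fun x => x)
    l.reverse_perm (List.pairwise_reverse.mpr h)

theorem pvA_spec (years : List Int) (r : Option Int) :
    (ordered_anchor_years_py years r).Perm (PySem.Set.ofList years) ∧
    (ordered_anchor_years_py years r).Pairwise (pvR r) := by
  unfold ordered_anchor_years_py
  have hpw : (PySem.List.sorted (PySem.Set.ofList years) (fun x => x) false).Pairwise (· < ·) :=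
    PySem.List.sorted_ofList_pairwise_lt years
  have hperm : (PySem.List.sorted (PySem.Set.ofList years) (fun x => x) false).Perm (PySem.Set.ofList years) :=
    PySem.List.sorted_perm _ _ _
  set uniq := PySem.List.sorted (PySem.Set.ofList years) (fun x => x) false with huniq
  match r with
  | none =>
    simp only
    rw [pv_sorted_rev_eq_reverse uniq hpw]
    exact ⟨(uniq.reverse_perm).trans hperm, by
      refine List.pairwise_reverse.mpr ?_
      exact hpw.imp (by intro a b hab; dsimp [pvR]; omega)⟩
  | some ref =>
    simp only
    have hpast : (uniq.filter (fun y => decide (y ≤ ref))).Pairwise (· < ·) := hpw.filter _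
    have hfut : (uniq.filter (fun y => decide (ref < y))).Pairwise (· < ·) := hpw.filter _
    rw [pv_sorted_rev_eq_reverse _ hpast,
        PySem.List.sorted_eq_of_perm_of_pairwise_lt _ _ _ (List.Perm.refl _) hfut]
    constructor
    · have h1 : (uniq.filter (fun y => decide (ref < y))) = uniq.filter (fun y => !decide (y ≤ ref)) := by
        apply List.filter_congr
        intro x _
        by_cases hx : x ≤ ref <;> simp [hx] <;> omega
      rw [h1]
      exact ((List.reverse_perm _).append_right _).trans
        ((List.filter_append_perm _ uniq).trans hperm)
    · refine List.pairwise_append.mpr ⟨?_, ?_, ?_⟩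
      · refine List.pairwise_reverse.mpr (List.Pairwise.imp_of_mem ?_ hpast)
        intro a b ha hb hab
        have ha' : a ≤ ref := by simpa using (List.mem_filter.mp ha).2
        have hb' : b ≤ ref := by simpa using (List.mem_filter.mp hb).2
        dsimp [pvR]; omega
      · refine List.Pairwise.imp_of_mem ?_ hfut
        intro a b ha hb hab
        have ha' : ref < a := by simpa using (List.mem_filter.mp ha).2
        have hb' : ref < b := by simpa using (List.mem_filter.mp hb).2
        dsimp [pvR]; omega
      · intro x hx y hy
        have hx' : x ≤ ref := by
          have := List.mem_reverse.mp hx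
          simpa using (List.mem_filter.mp this).2
        have hy' : ref < y := by simpa using (List.mem_filter.mp hy).2
        dsimp [pvR]; omega

-- ===== VERDICT (by name: the statement is the Claim_ definition above) =====
theorem ordered_anchor_years_py_spec : Claim_equal_ordered_anchor_years_py := by
  intro years r _
  unfold Spec_ordered_anchor_years_py ordered_anchor_years_py_alt
  rcases pvA_spec years r with ⟨hAperm, hApw⟩
  rcases pvSel_spec r (PySem.Set.ofList years) (PySem.Set.nodup_ofList years) with ⟨hBperm, hBpw⟩
  exact pv_eq_of_perm_of_pairwise r _ _ (hAperm.trans hBperm.symm) hApw hBpw
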